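-- pv_equiv track=rewrite | github.com/xRuffKez/NXPhish | py/proc_list_output.py | filter_phishing_domains
-- ===== SOURCE A (Python) =====
-- def filter_phishing_domains(phishing_domains, umbrella_domains, tranco_domains):
--     filtered_domains = []
--     for domain in phishing_domains:
--         if not any(umbrella_domain in domain.split(".")[-2:] for umbrella_domain in umbrella_domains) \
--                 and not any(tranco_domain in domain.split(".")[-2:] for tranco_domain in tranco_domains):
--             if not any(domain.endswith("." + subdomain) or subdomain.endswith("." + domain) for subdomain in phishing_domains if subdomain != domain):
--                 filtered_domains.append(domain)
--     return filtered_domains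
-- ===== SOURCE B (Python) =====
-- def _dot_suffixes(d):
--     # every suffix of d that starts right after a '.', longest first
--     suffixes = []
--     rest = d
--     while rest:
--         ch, rest = rest[0], rest[1:]
--         if ch == ".":
--             suffixes.append(rest)
--     return suffixes
--
--
-- def filter_phishing_domains(phishing_domains, umbrella_domains, tranco_domains):
--     whitelist = set(umbrella_domains) | set(tranco_domains)
--     domain_set = set(phishing_domains)
--     descendant_targets = set()
--     for d in phishing_domains:
--         descendant_targets.update(_dot_suffixes(d))
--     result = []
--     for d in phishing_domains:
--         if any(label in whitelist for label in d.split(".")[-2:]):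
--             continue
--         if any(suffix in domain_set for suffix in _dot_suffixes(d)):
--             continue
--         if d in descendant_targets:
--             continue
--         result.append(d)
--     return result
-- ===== Notes on version B (the rewrite author's own statement) =====
-- stated objective: faster
-- what changed: A rescans the whole phishing list for every domain to find ancestor/descendant pairs; B precomputes a set of all phishing domains and a set of every proper dot-suffix of every domain once, then decides each domain with O(1) set lookups, and checks the last-two-label whitelist against one merged umbrella+tranco set.
import Mathlib
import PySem

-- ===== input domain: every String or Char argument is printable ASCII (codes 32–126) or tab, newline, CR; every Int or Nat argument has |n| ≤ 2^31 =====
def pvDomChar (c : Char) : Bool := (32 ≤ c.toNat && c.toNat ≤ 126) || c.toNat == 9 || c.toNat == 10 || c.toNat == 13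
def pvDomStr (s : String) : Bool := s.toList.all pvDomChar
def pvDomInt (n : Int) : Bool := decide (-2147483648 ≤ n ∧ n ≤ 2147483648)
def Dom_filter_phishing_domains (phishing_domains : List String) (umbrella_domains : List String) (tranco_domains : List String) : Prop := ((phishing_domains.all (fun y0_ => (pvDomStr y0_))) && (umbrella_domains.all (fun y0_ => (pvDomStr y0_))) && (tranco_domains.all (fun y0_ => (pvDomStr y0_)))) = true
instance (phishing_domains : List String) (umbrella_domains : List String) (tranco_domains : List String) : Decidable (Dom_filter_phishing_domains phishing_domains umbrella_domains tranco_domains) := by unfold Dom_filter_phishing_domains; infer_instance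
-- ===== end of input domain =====

-- B replaces A's per-domain rescan of the whole phishing list by a precomputed set of all
-- proper dot-suffixes plus set-membership lookups (return value only; nothing is mutated).

-- ===== PORT A =====
def filter_phishing_domains (phishing_domains : List String) (umbrella_domains : List String) (tranco_domains : List String) : List String :=
  phishing_domains.foldl (fun filtered_domains domain =>
    let last2 := PySem.List.slice ((PySem.Str.split? domain ".").getD []) (some (-2)) none
    if !(umbrella_domains.any (fun u => last2.contains u))
       && !(tranco_domains.any (fun t => last2.contains t)) then
      if !(phishing_domains.any (fun subdomain =>
            subdomain != domain
            && (PySem.Str.endswith domain ("." ++ subdomain)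
                || PySem.Str.endswith subdomain ("." ++ domain)))) then
        filtered_domains ++ [domain]
      else filtered_domains
    else filtered_domains) []

-- ===== PORT B =====
-- every suffix of the string that starts right after a '.', longest first (Source B's _dot_suffixes)
def pvDotSuffixes : List Char → List (List Char)
  | [] => []
  | ch :: rest => if ch = '.' then rest :: pvDotSuffixes rest else pvDotSuffixes rest

def filter_phishing_domains_alt (phishing_domains : List String) (umbrella_domains : List String) (tranco_domains : List String) : List String :=
  let whitelist := PySem.Set.union (PySem.Set.ofList umbrella_domains) (PySem.Set.ofList tranco_domains)
  let domain_set := PySem.Set.ofList phishing_domains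
  let descendant_targets :=
    phishing_domains.foldl (fun s d => PySem.Set.update s ((pvDotSuffixes d.toList).map String.ofList)) (PySem.Set.ofList [])
  phishing_domains.foldl (fun result d =>
    if (PySem.List.slice ((PySem.Str.split? d ".").getD []) (some (-2)) none).any (fun label => whitelist.contains label) then result
    else if (pvDotSuffixes d.toList).any (fun suffix => domain_set.contains (String.ofList suffix)) then result
    else if descendant_targets.contains d then result
    else result ++ [d]) []

-- ===== PRECONDITION & SPEC =====
def Spec_filter_phishing_domains (phishing_domains : List String) (umbrella_domains : List String) (tranco_domains : List String) (out : List String) : Prop := out = filter_phishing_domains_alt phishing_domains umbrella_domains tranco_domains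
instance (phishing_domains : List String) (umbrella_domains : List String) (tranco_domains : List String) (out : List String) : Decidable (Spec_filter_phishing_domains phishing_domains umbrella_domains tranco_domains out) := by unfold Spec_filter_phishing_domains; infer_instance

-- ===== CLAIM (what is proved, stated in full; the proofs are below) =====
def Claim_equal_filter_phishing_domains : Prop := ∀ (phishing_domains : List String) (umbrella_domains : List String) (tranco_domains : List String), Dom_filter_phishing_domains phishing_domains umbrella_domains tranco_domains → Spec_filter_phishing_domains phishing_domains umbrella_domains tranco_domains (filter_phishing_domains phishing_domains umbrella_domains tranco_domains)

-- ===== LEMMAS AND PROOFS =====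

-- p is collected by pvDotSuffixes cs exactly when '.' :: p is a suffix of cs
theorem mem_pvDotSuffixes_iff (p cs : List Char) : p ∈ pvDotSuffixes cs ↔ ('.' :: p) <:+ cs := by
  induction cs with
  | nil => simp [pvDotSuffixes]
  | cons c rest ih =>
    rw [List.suffix_cons_iff]
    by_cases h : c = '.'
    · subst h
      simp [pvDotSuffixes, ih]
    · simp only [pvDotSuffixes, if_neg h, ih, List.cons.injEq]
      constructor
      · exact Or.inr
      · rintro (⟨h1, _⟩ | h2)
        · exact absurd h1.symm h
        · exact h2

theorem pvDotSuffixes_length_lt (p cs : List Char) (h : p ∈ pvDotSuffixes cs) : p.length < cs.length := by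
  have h2 := ((mem_pvDotSuffixes_iff p cs).1 h).length_le
  simp at h2
  omega

-- A's nested-if append loop is a filter
theorem foldl_ifif {α : Type} (f g : α → Bool) (l acc : List α) :
    l.foldl (fun acc x => if f x then (if g x then acc ++ [x] else acc) else acc) acc
      = acc ++ l.filter (fun x => f x && g x) := by
  induction l generalizing acc with
  | nil => simp
  | cons a t ih =>
    by_cases hf : f a <;> by_cases hg : g a <;> simp [hf, hg, ih]

-- B's triple-continue loop is a filter
theorem foldl_if3 {α : Type} (f g h : α → Bool) (l acc : List α) :
    l.foldl (fun acc x => if f x then acc else if g x then acc else if h x then acc else acc ++ [x]) acc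
      = acc ++ l.filter (fun x => !f x && !g x && !h x) := by
  induction l generalizing acc with
  | nil => simp
  | cons a t ih =>
    by_cases hf : f a <;> by_cases hg : g a <;> by_cases hh : h a <;> simp [hf, hg, hh, ih]

-- membership in a set built by a loop of updates
theorem mem_foldl_update {α β : Type} [BEq α] [LawfulBEq α] (g : β → List α) (l : List β)
    (s0 : PySem.Set α) (y : α) :
    y ∈ l.foldl (fun s d => PySem.Set.update s (g d)) s0 ↔ y ∈ s0 ∨ ∃ d ∈ l, y ∈ g d := by
  induction l generalizing s0 with
  | nil => simp
  | cons a t ih =>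
    simp only [List.foldl_cons, ih, PySem.Set.mem_update, List.mem_cons]
    constructor
    · rintro ((h | h) | ⟨d, hd, hy⟩)
      · exact Or.inl h
      · exact Or.inr ⟨a, Or.inl rfl, h⟩
      · exact Or.inr ⟨d, Or.inr hd, hy⟩
    · rintro (h | ⟨d, (rfl | hd), hy⟩)
      · exact Or.inl (Or.inl h)
      · exact Or.inl (Or.inr hy)
      · exact Or.inr ⟨d, hd, hy⟩

theorem endsDot_iff (a b : String) : PySem.Str.endswith a ("." ++ b) = true ↔ b.toList ∈ pvDotSuffixes a.toList := by
  rw [PySem.Str.endswith_eq, PySem.Chars.endswith_iff, mem_pvDotSuffixes_iff]; simp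

-- the two per-domain keep-conditions agree
theorem cond_eq (phishing_domains umbrella_domains tranco_domains : List String) (d : String) :
    ((!(umbrella_domains.any (fun u => (PySem.List.slice ((PySem.Str.split? d ".").getD []) (some (-2)) none).contains u))
       && !(tranco_domains.any (fun t => (PySem.List.slice ((PySem.Str.split? d ".").getD []) (some (-2)) none).contains t)))
      && !(phishing_domains.any (fun subdomain =>
            subdomain != d
            && (PySem.Str.endswith d ("." ++ subdomain)
                || PySem.Str.endswith subdomain ("." ++ d)))))
    = (!((PySem.List.slice ((PySem.Str.split? d ".").getD []) (some (-2)) none).any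
          (fun label => (PySem.Set.union (PySem.Set.ofList umbrella_domains) (PySem.Set.ofList tranco_domains)).contains label))
       && !((pvDotSuffixes d.toList).any (fun suffix => (PySem.Set.ofList phishing_domains).contains (String.ofList suffix)))
       && !((phishing_domains.foldl (fun s e => PySem.Set.update s ((pvDotSuffixes e.toList).map String.ofList)) (PySem.Set.ofList [])).contains d)) := by
  rw [Bool.eq_iff_iff]
  simp only [Bool.and_eq_true, Bool.not_eq_true', List.any_eq_false,
    Bool.or_eq_true, List.contains_iff_mem, PySem.Set.contains_iff, PySem.Set.mem_union,
    PySem.Set.mem_ofList, endsDot_iff]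
  constructor
  · rintro ⟨⟨hu, ht⟩, hin⟩
    refine ⟨⟨?_, ?_⟩, ?_⟩
    · rintro x hx (h | h)
      · exact hu x h hx
      · exact ht x h hx
    · intro s hs hmem
      have hlen := pvDotSuffixes_length_lt s d.toList hs
      have hne : String.ofList s ≠ d := by
        intro h
        have : s = d.toList := by rw [← h]; simp
        simp [this] at hlen
      have := hin (String.ofList s) hmem
      simp [bne_iff_ne, hne, hs] at this
    · have hmem : d ∉ phishing_domains.foldl (fun s e => PySem.Set.update s ((pvDotSuffixes e.toList).map String.ofList)) (PySem.Set.ofList []) := by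
        rw [mem_foldl_update]
        rintro (h | ⟨e, he, hx⟩)
        · simp at h
        · rcases List.mem_map.1 hx with ⟨s, hs, rfl⟩
          have hlen := pvDotSuffixes_length_lt s e.toList hs
          have hne : e ≠ String.ofList s := by
            intro h
            have : s = e.toList := by rw [h]; simp
            simp [this] at hlen
          have := hin e he
          simp [bne_iff_ne, hne, hs] at this
      exact Bool.eq_false_iff.mpr (fun hc => hmem ((PySem.Set.contains_iff _ _).1 hc))
  · rintro ⟨⟨hw, hanc⟩, hdesc⟩
    refine ⟨⟨?_, ?_⟩, ?_⟩
    · intro x hx hmem; exact hw x hmem (Or.inl hx)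
    · intro x hx hmem; exact hw x hmem (Or.inr hx)
    · rintro x hx ⟨-, (h1 | h2)⟩
      · have := hanc x.toList h1
        simp at this
        exact this hx
      · have : d ∈ phishing_domains.foldl (fun s e => PySem.Set.update s ((pvDotSuffixes e.toList).map String.ofList)) (PySem.Set.ofList []) := by
          rw [mem_foldl_update]
          exact Or.inr ⟨x, hx, List.mem_map.2 ⟨d.toList, h2, by simp⟩⟩
        rw [← PySem.Set.contains_iff] at this
        rw [hdesc] at this
        exact Bool.false_ne_true this

-- ===== VERDICT (by name: the statement is the Claim_ definition above) =====
theorem filter_phishing_domains_spec : Claim_equal_filter_phishing_domains := by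
  intro pd ud td _
  show filter_phishing_domains pd ud td = filter_phishing_domains_alt pd ud td
  unfold filter_phishing_domains filter_phishing_domains_alt
  rw [foldl_ifif, foldl_if3]
  simp only [List.nil_append]
  apply List.filter_congr
  intro d _
  have := cond_eq pd ud td d
  simpa using this
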